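-- pv_equiv track=rewrite | github.com/Surya-132/amFOSS-Task | Task-4/Grid_lock.py | make_sets
-- ===== SOURCE A (Python) =====
-- def make_sets(grid):
--     rows=len(grid)
--     cols=len(grid[0])
--     word_slots=set()
--     visited=set()
--     for row in range(rows):
--         for col in range(cols):
--             if grid[row][col]!="-":continue
--             if col==0 or grid[row][col-1]!="-":
--                 # right
--                 c=col
--                 while c<cols and grid[row][c]=="-":
--                     visited.add((row,c))
--                     c+=1
--                 if c-1>col:word_slots.add(((row,col),c-col,(0,1)))
--             if row==0 or grid[row-1][col]!="-":
--                 # down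
--                 r=row
--                 while r<rows and grid[r][col]=="-":
--                     visited.add((r,col))
--                     r+=1
--                 if r-1>row:word_slots.add(((row,col),r-row,(1,0)))
--     return word_slots
-- ===== SOURCE B (Python) =====
-- def _runs(cells):
--     # suffix scan: out[i] = length of the '-' run starting at i (0 if cells[i] != '-')
--     out = []
--     run = 0
--     for x in reversed(cells):
--         run = run + 1 if x == "-" else 0
--         out.append(run)
--     out.reverse()
--     return out
--
--
-- def make_sets(grid):
--     rows = len(grid)
--     cols = len(grid[0])
--     right = [_runs(grid[r][:cols]) for r in range(rows)]
--     down = [_runs([grid[r][c] for r in range(rows)]) for c in range(cols)]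
--     slots = set()
--     for r in range(rows):
--         for c in range(cols):
--             if grid[r][c] != "-":
--                 continue
--             if (c == 0 or grid[r][c - 1] != "-") and right[r][c] >= 2:
--                 slots.add(((r, c), right[r][c], (0, 1)))
--             if (r == 0 or grid[r - 1][c] != "-") and down[c][r] >= 2:
--                 slots.add(((r, c), down[c][r], (1, 0)))
--     return slots
-- ===== Notes on version B (the rewrite author's own statement) =====
-- stated objective: alternative
-- what changed: A re-measures each dash run with inner while-loops fired at run-start cells (and keeps an unused visited set); B precomputes run-length tables by one linear suffix scan per row and per column and then emits slots with plain table lookups, with no inner loops.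
import Mathlib
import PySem

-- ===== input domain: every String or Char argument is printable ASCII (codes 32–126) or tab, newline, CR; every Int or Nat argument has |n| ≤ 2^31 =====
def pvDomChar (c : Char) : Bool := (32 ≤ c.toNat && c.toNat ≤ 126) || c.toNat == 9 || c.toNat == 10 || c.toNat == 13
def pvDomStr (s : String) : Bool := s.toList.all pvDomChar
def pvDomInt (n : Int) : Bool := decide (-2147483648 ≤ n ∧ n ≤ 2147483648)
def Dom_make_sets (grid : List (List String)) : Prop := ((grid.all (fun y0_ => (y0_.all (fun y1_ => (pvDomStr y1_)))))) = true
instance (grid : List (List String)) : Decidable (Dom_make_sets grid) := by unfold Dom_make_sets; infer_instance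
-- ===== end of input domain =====

-- B replaces A's per-start-cell inner `while` rescans by precomputed suffix-scan run-length
-- tables (one linear pass per row and per column); objective: alternative decomposition.
-- Both programs return a Python set; equality is proved on the identical insertion order.

-- ===== PORT A =====

-- grid[r][c]; total form of the lookup — Pre_make_sets keeps every access in range
def msGet (grid : List (List String)) (r c : Int) : String :=
  PySem.List.pyGetD (PySem.List.pyGetD grid r []) c ""

-- the `while c<cols and grid[row][c]=="-"` loop (fuel = remaining cells, exact)
def msScanRight (grid : List (List String)) (row cols : Int) :
    Nat → Int → PySem.Set (Int × Int) → Int × PySem.Set (Int × Int)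
  | 0, c, vis => (c, vis)
  | fuel+1, c, vis =>
      if c < cols ∧ msGet grid row c = "-" then
        msScanRight grid row cols fuel (c+1) (PySem.Set.add vis (row, c))
      else (c, vis)

-- the `while r<rows and grid[r][col]=="-"` loop
def msScanDown (grid : List (List String)) (col rows : Int) :
    Nat → Int → PySem.Set (Int × Int) → Int × PySem.Set (Int × Int)
  | 0, r, vis => (r, vis)
  | fuel+1, r, vis =>
      if r < rows ∧ msGet grid r col = "-" then
        msScanDown grid col rows fuel (r+1) (PySem.Set.add vis (r, col))
      else (r, vis)

def make_sets (grid : List (List String)) : List ((Int × Int) × Int × (Int × Int)) :=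
  let rows : Int := grid.length
  let cols : Int := (PySem.List.pyGetD grid 0 ([] : List String)).length
  let st := (PySem.List.pyRange 0 rows 1).foldl (fun st row =>
    (PySem.List.pyRange 0 cols 1).foldl (fun st col =>
      if msGet grid row col ≠ "-" then st else
      let st1 :=
        if col = 0 ∨ msGet grid row (col-1) ≠ "-" then
          let p := msScanRight grid row cols (cols - col).toNat col st.2
          (if p.1 - 1 > col then PySem.Set.add st.1 ((row, col), (p.1 - col, ((0:Int), (1:Int)))) else st.1, p.2)
        else st
      if row = 0 ∨ msGet grid (row-1) col ≠ "-" then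
        let q := msScanDown grid col rows (rows - row).toNat row st1.2
        (if q.1 - 1 > row then PySem.Set.add st1.1 ((row, col), (q.1 - row, ((1:Int), (0:Int)))) else st1.1, q.2)
      else st1
    ) st)
    ((PySem.Set.ofList ([] : List ((Int × Int) × Int × (Int × Int))), PySem.Set.ofList ([] : List (Int × Int))))
  st.1

-- ===== PORT B =====

-- _runs: suffix scan; out[i] = length of the '-' run starting at i
def msRuns (cells : List String) : List Int :=
  match cells with
  | [] => []
  | x :: rest =>
      let t := msRuns rest
      (if x = "-" then 1 + t.headD 0 else 0) :: t

def make_sets_alt (grid : List (List String)) : List ((Int × Int) × Int × (Int × Int)) :=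
  let rows : Int := grid.length
  let cols : Int := (PySem.List.pyGetD grid 0 ([] : List String)).length
  let right : List (List Int) := (PySem.List.pyRange 0 rows 1).map
    (fun r => msRuns (PySem.List.slice (PySem.List.pyGetD grid r []) none (some cols)))
  let down : List (List Int) := (PySem.List.pyRange 0 cols 1).map
    (fun c => msRuns ((PySem.List.pyRange 0 rows 1).map (fun r => msGet grid r c)))
  (PySem.List.pyRange 0 rows 1).foldl (fun slots r =>
    (PySem.List.pyRange 0 cols 1).foldl (fun slots c =>
      if msGet grid r c ≠ "-" then slots else
      let rl := PySem.List.pyGetD (PySem.List.pyGetD right r []) c 0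
      let slots := if (c = 0 ∨ msGet grid r (c-1) ≠ "-") ∧ rl ≥ 2 then
          PySem.Set.add slots ((r, c), (rl, ((0:Int), (1:Int)))) else slots
      let dl := PySem.List.pyGetD (PySem.List.pyGetD down c []) r 0
      if (r = 0 ∨ msGet grid (r-1) c ≠ "-") ∧ dl ≥ 2 then
        PySem.Set.add slots ((r, c), (dl, ((1:Int), (0:Int)))) else slots
    ) slots) (PySem.Set.ofList ([] : List ((Int × Int) × Int × (Int × Int))))

-- ===== PRECONDITION & SPEC =====
-- A raises IndexError on the empty grid (grid[0]) and on grids with a row shorter than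
-- row 0 (grid[r][c] for c < len(grid[0])); Pre_ excludes exactly those.
def Pre_make_sets (grid : List (List String)) : Prop :=
  grid ≠ [] ∧ ∀ row ∈ grid, (grid.getD 0 []).length ≤ row.length
instance (grid : List (List String)) : Decidable (Pre_make_sets grid) := by
  unfold Pre_make_sets; infer_instance

def pvWitness_make_sets : List (List String) :=
  [["-", "-", "#"], ["-", "x", "-"], ["-", "-", "-"]]

def Spec_make_sets (grid : List (List String)) (out : List ((Int × Int) × Int × (Int × Int))) : Prop := out = make_sets_alt grid
instance (grid : List (List String)) (out : List ((Int × Int) × Int × (Int × Int))) : Decidable (Spec_make_sets grid out) := by unfold Spec_make_sets; infer_instance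

-- ===== CLAIM (what is proved, stated in full; the proofs are below) =====
def Claim_equal_make_sets : Prop := ∀ (grid : List (List String)), Dom_make_sets grid → Pre_make_sets grid → Spec_make_sets grid (make_sets grid)

-- ===== LEMMAS AND PROOFS =====

-- fold a pair state vs fold its first component
theorem msFoldlFst {α σ τ : Type} (l : List α) (f : σ × τ → α → σ × τ) (g : σ → α → σ)
    (h : ∀ x ∈ l, ∀ s : σ × τ, (f s x).1 = g s.1 x) :
    ∀ s : σ × τ, (l.foldl f s).1 = l.foldl g s.1 := by
  induction l with
  | nil => intro s; rfl
  | cons x xs ih =>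
      intro s
      simp only [List.foldl_cons]
      rw [← h x (by simp) s]
      exact ih (fun y hy s' => h y (by simp [hy]) s') (f s x)

-- value of msRuns at an in-range index
theorem msRuns_length (cells : List String) : (msRuns cells).length = cells.length := by
  induction cells with
  | nil => rfl
  | cons x rest ih => simp [msRuns, ih]

theorem msRuns_getD (cells : List String) (j : Nat) (hj : j < cells.length) :
    (msRuns cells).getD j 0 =
      if cells.getD j "" = "-" then 1 + (msRuns cells).getD (j+1) 0 else 0 := by
  induction cells generalizing j with
  | nil => simp at hj
  | cons x rest ih =>
      cases j with
      | zero =>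
          simp only [msRuns, List.getD]
          cases h : msRuns rest with
          | nil => simp [List.headD]
          | cons a t => simp [List.headD]
      | succ j =>
          simp only [msRuns, List.getD_cons_succ]
          exact ih j (by simpa using hj)

theorem msRuns_getD_out (cells : List String) (j : Nat) (hj : cells.length ≤ j) :
    (msRuns cells).getD j 0 = 0 := by
  apply List.getD_eq_default
  rw [msRuns_length]; exact hj

-- the while-scan lands exactly run-length cells further (abstract over the cell list,
-- the direction, and the visited bookkeeping)
theorem msScan_abstract (cols : Int) (cellf : Int → String) (cells : List String)
    (w : Int → Int × Int)
    (hlen : (cells.length : Int) = cols)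
    (hget : ∀ j : Nat, j < cells.length → cellf (j : Int) = cells.getD j "")
    (scan : Nat → Int → PySem.Set (Int × Int) → Int × PySem.Set (Int × Int))
    (hscan0 : ∀ c vis, scan 0 c vis = (c, vis))
    (hscanS : ∀ fuel c vis, scan (fuel+1) c vis =
      if c < cols ∧ cellf c = "-" then
        scan fuel (c+1) (PySem.Set.add vis (w c)) else (c, vis)) :
    ∀ (fuel : Nat) (c : Int) (vis : PySem.Set (Int × Int)), 0 ≤ c →
      (cols - c).toNat ≤ fuel →
      (scan fuel c vis).1 = c + (msRuns cells).getD c.toNat 0 := by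
  intro fuel
  induction fuel with
  | zero =>
      intro c vis hc hfuel
      rw [hscan0]
      have h0 : cells.length ≤ c.toNat := by omega
      simp only [msRuns_getD_out cells c.toNat h0]
      simp
  | succ fuel ih =>
      intro c vis hc hfuel
      rw [hscanS]
      by_cases hcond : c < cols ∧ cellf c = "-"
      · rw [if_pos hcond]
        have hclt : c.toNat < cells.length := by omega
        have hcell : cells.getD c.toNat "" = "-" := by
          rw [← hget c.toNat hclt]
          have : ((c.toNat : Nat) : Int) = c := by omega
          rw [this]; exact hcond.2
        have hrec := ih (c+1) (PySem.Set.add vis (w c)) (by omega) (by omega)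
        rw [hrec, msRuns_getD cells c.toNat hclt, if_pos hcell]
        have : (c+1).toNat = c.toNat + 1 := by omega
        rw [this]; ring
      · rw [if_neg hcond]
        have : (msRuns cells).getD c.toNat 0 = 0 := by
          by_cases hlt : c < cols
          · have hclt : c.toNat < cells.length := by omega
            have hne : cellf c ≠ "-" := by tauto
            rw [msRuns_getD cells c.toNat hclt, if_neg]
            rw [← hget c.toNat hclt]
            have : ((c.toNat : Nat) : Int) = c := by omega
            rw [this]; exact hne
          · exact msRuns_getD_out cells c.toNat (by omega)
        simp only [this]
        simp

-- ===== VERDICT (by name: the statement is the Claim_ definition above) =====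
theorem make_sets_spec : Claim_equal_make_sets := by
  intro grid _ hpre
  unfold Spec_make_sets
  obtain ⟨hne, hwide⟩ := hpre
  simp only [make_sets, make_sets_alt]
  refine msFoldlFst _ _ _ ?_ _
  intro row hrowmem st
  refine msFoldlFst _ _ _ ?_ _
  intro c hcmem st'
  rw [PySem.List.mem_pyRange_one] at hrowmem hcmem
  obtain ⟨hr0, hr1⟩ := hrowmem
  obtain ⟨hc0, hc1⟩ := hcmem
  set n : Nat := (PySem.List.pyGetD grid 0 ([] : List String)).length with hn
  set R : List String := PySem.List.pyGetD grid row ([] : List String) with hRdef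
  -- the current row is wide enough
  have hRlen : n ≤ R.length := by
    have hRelem : R = grid[row.toNat]'(by omega) := by
      rw [hRdef]; exact PySem.List.pyGetD_eq_getElem grid [] hr0 hr1
    have hmem : grid[row.toNat]'(by omega) ∈ grid := List.getElem_mem _
    rw [hRelem]
    have := hwide _ hmem
    rwa [hn, PySem.List.pyGetD_zero]
  have hcellsHlen : (R.take n).length = n := by
    rw [List.length_take]; omega
  -- horizontal scan = horizontal run table entry
  have hgetH : ∀ j : Nat, j < (R.take n).length → msGet grid row (j : Int) = (R.take n).getD j "" := by
    intro j hj
    rw [hcellsHlen] at hj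
    show PySem.List.pyGetD (PySem.List.pyGetD grid row []) (j : Int) "" = _
    rw [← hRdef, PySem.List.pyGetD_natCast R j ""]
    simp only [List.getD]
    rw [List.getElem?_take_of_lt hj]
  have hscanH : ∀ vis, (msScanRight grid row (n : Int) (((n : Int) - c).toNat) c vis).1
      = c + (msRuns (R.take n)).getD c.toNat 0 := fun vis =>
    msScan_abstract (n : Int) (msGet grid row) (R.take n) (fun j => (row, j))
      (by rw [hcellsHlen]) hgetH (msScanRight grid row (n : Int))
      (fun _ _ => rfl) (fun _ _ _ => rfl) _ c vis hc0 (le_refl _)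
  -- vertical scan = vertical run table entry
  have hcellsVlen : (((PySem.List.pyRange 0 (grid.length : Int) 1).map (fun i => msGet grid i c)).length) = grid.length := by
    rw [List.length_map, PySem.List.length_pyRange_one]; omega
  have hgetV : ∀ j : Nat, j < (((PySem.List.pyRange 0 (grid.length : Int) 1).map (fun i => msGet grid i c)).length) →
      msGet grid (j : Int) c = ((PySem.List.pyRange 0 (grid.length : Int) 1).map (fun i => msGet grid i c)).getD j "" := by
    intro j hj
    rw [hcellsVlen] at hj
    simp only [List.getD]
    rw [PySem.List.getElem?_map_pyRange_zero _ grid.length j hj]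
    rfl
  have hscanV : ∀ vis, (msScanDown grid c (grid.length : Int) (((grid.length : Int) - row).toNat) row vis).1
      = row + (msRuns ((PySem.List.pyRange 0 (grid.length : Int) 1).map (fun i => msGet grid i c))).getD row.toNat 0 := fun vis =>
    msScan_abstract (grid.length : Int) (fun i => msGet grid i c) _ (fun i => (i, c))
      (by rw [hcellsVlen]) hgetV (msScanDown grid c (grid.length : Int))
      (fun _ _ => rfl) (fun _ _ _ => rfl) _ row vis hr0 (le_refl _)
  -- the B-side table lookups
  have htabH : PySem.List.pyGetD (PySem.List.pyGetD ((PySem.List.pyRange 0 (grid.length : Int) 1).map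
        (fun r => msRuns (PySem.List.slice (PySem.List.pyGetD grid r []) none (some (n : Int))))) row []) c 0
      = (msRuns (R.take n)).getD c.toNat 0 := by
    rw [PySem.List.pyGetD_map_pyRange_of_nonneg _ _ row [] hr0 hr1, ← hRdef,
      PySem.List.slice_to_natCast R n]
    have hlt : c < ((msRuns (R.take n)).length : Int) := by
      rw [msRuns_length, hcellsHlen]; exact hc1
    rw [PySem.List.pyGetD_eq_getElem _ 0 hc0 hlt, List.getD_eq_getElem _ 0 (by omega)]
  have htabV : PySem.List.pyGetD (PySem.List.pyGetD ((PySem.List.pyRange 0 (n : Int) 1).map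
        (fun c' => msRuns ((PySem.List.pyRange 0 (grid.length : Int) 1).map (fun r => msGet grid r c')))) c []) row 0
      = (msRuns ((PySem.List.pyRange 0 (grid.length : Int) 1).map (fun i => msGet grid i c))).getD row.toNat 0 := by
    rw [PySem.List.pyGetD_map_pyRange_of_nonneg _ _ c [] hc0 hc1]
    have hlt : row < ((msRuns ((PySem.List.pyRange 0 (grid.length : Int) 1).map (fun i => msGet grid i c))).length : Int) := by
      rw [msRuns_length, hcellsVlen]; exact hr1
    rw [PySem.List.pyGetD_eq_getElem _ 0 hr0 hlt, List.getD_eq_getElem _ 0 (by omega)]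
  -- per-cell step equality
  by_cases hdash : msGet grid row c = "-"
  · simp only [hdash, ne_eq, not_true_eq_false, if_false, htabH, htabV, hscanH, hscanV]
    set RL := (msRuns (R.take n)).getD c.toNat 0 with hRL
    set DL := (msRuns ((PySem.List.pyRange 0 (grid.length : Int) 1).map (fun i => msGet grid i c))).getD row.toNat 0 with hDL
    have hiffH : (c + RL - 1 > c) ↔ (RL ≥ 2) := by omega
    have hiffV : (row + DL - 1 > row) ↔ (DL ≥ 2) := by omega
    simp only [hiffH, hiffV, add_sub_cancel_left]
    by_cases g1 : c = 0 ∨ msGet grid row (c - 1) ≠ "-" <;>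
      by_cases g2 : row = 0 ∨ msGet grid (row - 1) c ≠ "-" <;>
      by_cases h1 : RL ≥ 2 <;> by_cases h2 : DL ≥ 2 <;>
      simp [g1, g2, h1, h2]
  · simp [hdash]
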